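-- pv_equiv track=rewrite | github.com/roodrallec/biomedical-semantic-qa | part_2.py | build_new_tokens
-- ===== SOURCE A (Python) =====
-- def build_new_tokens(q_1_tokens_list, q_2_tokens_list, q_1_pred_labels, q_2_pred_labels, allowed_class, token_limit):
--     new_tokens = []
--     new_labels = []
--     limit = 0
--
--     for q_1_tokens, q_2_tokens, q_1_pred_label, q_2_pred_label in zip(q_1_tokens_list, q_2_tokens_list, q_1_pred_labels, q_2_pred_labels):
--
--         if limit >= token_limit:
--             break
--
--         if allowed_class and q_1_pred_label not in allowed_class:
--             continue
--
--         if q_1_pred_label == q_2_pred_label: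
--             new_tokens.append(q_1_tokens)
--             new_labels.append(q_1_pred_label)
--             new_tokens.append(q_2_tokens)
--             new_labels.append(q_2_pred_label)
--             limit += 2
--
--     return new_tokens, new_labels
-- ===== SOURCE B (Python) =====
-- def build_new_tokens(q_1_tokens_list, q_2_tokens_list, q_1_pred_labels, q_2_pred_labels, allowed_class, token_limit):
--     n = min(len(q_1_tokens_list), len(q_2_tokens_list), len(q_1_pred_labels), len(q_2_pred_labels))
--     keep = -(-token_limit // 2)  # ceil(token_limit / 2); non-positive means nothing is kept
--     idxs = []
--     i = 0
--     while len(idxs) < keep and i < n: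
--         l = q_1_pred_labels[i]
--         if (not allowed_class or l in allowed_class) and l == q_2_pred_labels[i]:
--             idxs.append(i)
--         i += 1
--     new_tokens = [t for j in idxs for t in (q_1_tokens_list[j], q_2_tokens_list[j])]
--     new_labels = [l for j in idxs for l in (q_1_pred_labels[j], q_1_pred_labels[j])]
--     return new_tokens, new_labels
-- ===== Notes on version B (the rewrite author's own statement) =====
-- stated objective: alternative
-- what changed: Replaces the streaming accumulate-and-break loop over zipped tuples by an index-based plan-then-gather: a while loop first collects up to ceil(token_limit/2) matching row indices, then two comprehensions build the outputs by indexing the original lists; no zipping, no token counter.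
import Mathlib
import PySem

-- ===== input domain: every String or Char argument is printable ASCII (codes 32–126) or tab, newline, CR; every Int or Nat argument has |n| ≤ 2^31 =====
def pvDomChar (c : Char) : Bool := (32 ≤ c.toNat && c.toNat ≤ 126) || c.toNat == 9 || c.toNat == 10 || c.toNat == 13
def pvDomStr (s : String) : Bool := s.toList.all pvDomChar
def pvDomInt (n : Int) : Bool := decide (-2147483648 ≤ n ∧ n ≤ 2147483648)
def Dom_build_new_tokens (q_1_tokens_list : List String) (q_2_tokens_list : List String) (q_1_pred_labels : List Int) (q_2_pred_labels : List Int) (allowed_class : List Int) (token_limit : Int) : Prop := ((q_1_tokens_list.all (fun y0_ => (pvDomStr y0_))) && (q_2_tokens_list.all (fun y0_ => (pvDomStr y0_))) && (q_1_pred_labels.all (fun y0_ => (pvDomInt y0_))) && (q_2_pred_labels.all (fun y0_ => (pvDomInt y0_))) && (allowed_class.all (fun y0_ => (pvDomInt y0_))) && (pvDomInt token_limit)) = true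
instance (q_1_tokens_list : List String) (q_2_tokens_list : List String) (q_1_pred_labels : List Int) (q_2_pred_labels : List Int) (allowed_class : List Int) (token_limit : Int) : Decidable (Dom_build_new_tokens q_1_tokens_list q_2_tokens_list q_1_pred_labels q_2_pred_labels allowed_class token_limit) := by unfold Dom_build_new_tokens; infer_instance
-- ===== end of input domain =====

-- B replaces A's accumulate-and-break loop over zipped tuples by an index-based plan-then-gather:
-- collect up to ceil(token_limit/2) matching row indices with a while loop, then gather
-- tokens/labels by indexing the original lists; objective: alternative, same cost.


-- ===== PORT A =====
-- loop of A: front-building recursion over the zipped lists with the 'limit' counter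
def pvGoA (allowed_class : List Int) (token_limit : Int) :
    List (String × String × Int × Int) → Int → List String × List Int
  | [], _ => ([], [])
  | (t1, t2, l1, l2) :: rest, limit =>
    if limit ≥ token_limit then ([], [])
    else if !allowed_class.isEmpty && !allowed_class.contains l1 then
      pvGoA allowed_class token_limit rest limit
    else if l1 == l2 then
      let (ts, ls) := pvGoA allowed_class token_limit rest (limit + 2)
      (t1 :: t2 :: ts, l1 :: l2 :: ls)
    else pvGoA allowed_class token_limit rest limit

def build_new_tokens (q_1_tokens_list : List String) (q_2_tokens_list : List String) (q_1_pred_labels : List Int) (q_2_pred_labels : List Int) (allowed_class : List Int) (token_limit : Int) : List String × List Int :=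
  pvGoA allowed_class token_limit
    (q_1_tokens_list.zip (q_2_tokens_list.zip (q_1_pred_labels.zip q_2_pred_labels)))
    0

-- ===== PORT B =====
-- B's while loop: collect matching indices until the quota 'keep' is reached or i = n.
-- Indexing l1s[i]/l2s[i] is ported as getD with i < n ≤ length, so the default is never used.
def pvIdxLoopB (l1s l2s allowed : List Int) (keep : Int) (n : Nat) (i : Nat) (idxs : List Nat) : List Nat :=
  if _h : (idxs.length : Int) < keep ∧ i < n then
    let l := l1s.getD i 0
    if (allowed.isEmpty || allowed.contains l) && l == l2s.getD i 0 then
      pvIdxLoopB l1s l2s allowed keep n (i + 1) (idxs ++ [i])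
    else
      pvIdxLoopB l1s l2s allowed keep n (i + 1) idxs
  else idxs
termination_by n - i

def build_new_tokens_alt (q_1_tokens_list : List String) (q_2_tokens_list : List String) (q_1_pred_labels : List Int) (q_2_pred_labels : List Int) (allowed_class : List Int) (token_limit : Int) : List String × List Int :=
  let n := min q_1_tokens_list.length (min q_2_tokens_list.length (min q_1_pred_labels.length q_2_pred_labels.length))
  let keep := -(PySem.Int.floordiv (-token_limit) 2)
  let idxs := pvIdxLoopB q_1_pred_labels q_2_pred_labels allowed_class keep n 0 []
  (idxs.flatMap (fun j => [q_1_tokens_list.getD j "", q_2_tokens_list.getD j ""]),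
   idxs.flatMap (fun j => [q_1_pred_labels.getD j 0, q_1_pred_labels.getD j 0]))

-- ===== PRECONDITION & SPEC =====
def Spec_build_new_tokens (q_1_tokens_list : List String) (q_2_tokens_list : List String) (q_1_pred_labels : List Int) (q_2_pred_labels : List Int) (allowed_class : List Int) (token_limit : Int) (out : List String × List Int) : Prop := out = build_new_tokens_alt q_1_tokens_list q_2_tokens_list q_1_pred_labels q_2_pred_labels allowed_class token_limit
instance (q_1_tokens_list : List String) (q_2_tokens_list : List String) (q_1_pred_labels : List Int) (q_2_pred_labels : List Int) (allowed_class : List Int) (token_limit : Int) (out : List String × List Int) : Decidable (Spec_build_new_tokens q_1_tokens_list q_2_tokens_list q_1_pred_labels q_2_pred_labels allowed_class token_limit out) := by unfold Spec_build_new_tokens; infer_instance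

-- ===== CLAIM (what is proved, stated in full; the proofs are below) =====
def Claim_equal_build_new_tokens : Prop := ∀ (q_1_tokens_list : List String) (q_2_tokens_list : List String) (q_1_pred_labels : List Int) (q_2_pred_labels : List Int) (allowed_class : List Int) (token_limit : Int), Dom_build_new_tokens q_1_tokens_list q_2_tokens_list q_1_pred_labels q_2_pred_labels allowed_class token_limit → Spec_build_new_tokens q_1_tokens_list q_2_tokens_list q_1_pred_labels q_2_pred_labels allowed_class token_limit (build_new_tokens q_1_tokens_list q_2_tokens_list q_1_pred_labels q_2_pred_labels allowed_class token_limit)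

-- ===== LEMMAS AND PROOFS =====
-- A's loop from counter 'limit' produces the first ceil((token_limit-limit)/2) filtered pairs, flattened
lemma pvGoA_eq (allowed_class : List Int) (token_limit : Int)
    (z : List (String × String × Int × Int)) : ∀ (limit : Int),
    pvGoA allowed_class token_limit z limit =
      (let kept := ((z.filter
            (fun x => (allowed_class.isEmpty || allowed_class.contains x.2.2.1) && x.2.2.1 == x.2.2.2)).map
          (fun x => (x.1, x.2.1, x.2.2.1))).take
          (max 0 (PySem.Int.floordiv (token_limit - limit + 1) 2)).toNat
       (kept.flatMap (fun p => [p.1, p.2.1]), kept.flatMap (fun p => [p.2.2, p.2.2]))) := by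
  induction z with
  | nil => intro limit; simp [pvGoA]
  | cons x rest ih =>
    intro limit
    obtain ⟨t1, t2, l1, l2⟩ := x
    rw [PySem.Int.floordiv_eq_ediv_of_pos (by omega : (0:Int) < 2)]
    by_cases hb : limit ≥ token_limit
    · have h0 : (max 0 ((token_limit - limit + 1) / 2)).toNat = 0 := by omega
      simp [pvGoA, hb, h0]
    · have hpos : 0 < (max 0 ((token_limit - limit + 1) / 2)).toNat := by omega
      by_cases hskip : (!allowed_class.isEmpty && !allowed_class.contains l1) = true
      · have hc : ((allowed_class.isEmpty || allowed_class.contains l1) && l1 == l2) = false := by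
          simp at hskip ⊢; intro h; exact absurd h (by tauto)
        rw [pvGoA, if_neg hb, if_pos hskip, ih limit,
          PySem.Int.floordiv_eq_ediv_of_pos (by omega : (0:Int) < 2),
          List.filter_cons_of_neg (by simpa using hc)]
      · by_cases heq : l1 = l2
        · have hc : ((allowed_class.isEmpty || allowed_class.contains l1) && l1 == l2) = true := by
            simp at hskip ⊢; exact ⟨by tauto, heq⟩
          have hstep : (max 0 ((token_limit - limit + 1) / 2)).toNat
              = (max 0 ((token_limit - (limit + 2) + 1) / 2)).toNat + 1 := by omega
          rw [pvGoA, if_neg hb, if_neg hskip, if_pos (by simp [heq]), ih (limit + 2),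
            PySem.Int.floordiv_eq_ediv_of_pos (by omega : (0:Int) < 2),
            List.filter_cons_of_pos (by simpa using hc)]
          simp only [List.map_cons, hstep, List.take_succ_cons, List.flatMap_cons]
          subst heq; rfl
        · have hc : ((allowed_class.isEmpty || allowed_class.contains l1) && l1 == l2) = false := by
            simp [heq]
          rw [pvGoA, if_neg hb, if_neg hskip, if_neg (by simp [heq]), ih limit,
            PySem.Int.floordiv_eq_ediv_of_pos (by omega : (0:Int) < 2),
            List.filter_cons_of_neg (by simpa using hc)]

-- B's while loop collects idxs ++ the first (keep - |idxs|) matching indices in [i, n)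
lemma pvIdxLoopB_eq (l1s l2s allowed : List Int) (keep : Int) (n : Nat) :
    ∀ (i : Nat) (idxs : List Nat),
    pvIdxLoopB l1s l2s allowed keep n i idxs =
      idxs ++ ((List.range' i (n - i)).filter
          (fun j => (allowed.isEmpty || allowed.contains (l1s.getD j 0)) && l1s.getD j 0 == l2s.getD j 0)).take
        (keep - idxs.length).toNat := by
  intro i
  induction hfuel : n - i using Nat.strong_induction_on generalizing i with
  | _ fuel ih =>
    intro idxs
    rw [pvIdxLoopB]
    by_cases h : (idxs.length : Int) < keep ∧ i < n
    · have hn : n - i = (n - (i + 1)) + 1 := by omega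
      rw [dif_pos h, ← hfuel, hn, List.range'_succ]
      have hrec1 := ih (n - (i + 1)) (by omega) (i + 1) rfl (idxs ++ [i])
      have hrec2 := ih (n - (i + 1)) (by omega) (i + 1) rfl idxs
      have hk : (keep - (idxs.length : Int)).toNat
          = (keep - ((idxs.length : Int) + 1)).toNat + 1 := by omega
      by_cases hcp : (allowed = [] ∨ l1s[i]?.getD 0 ∈ allowed) ∧ l1s[i]?.getD 0 = l2s[i]?.getD 0
      · have hcp' : allowed = [] ∨ l2s[i]?.getD 0 ∈ allowed := hcp.2 ▸ hcp.1
        simp [hcp, hcp', hrec1, hk, List.append_assoc]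
      · simp [hcp, hrec2]
    · rw [dif_neg h]
      rcases not_and_or.mp h with h1 | h2
      · have : (keep - idxs.length).toNat = 0 := by omega
        simp [this]
      · have hf : fuel = 0 := by omega
        have : (keep - idxs.length).toNat = 0 ∨ True := Or.inr trivial
        simp [hf]

-- the zipped list is the range of indices mapped through getD-gathering
lemma pvZip_eq_map_range (q1 q2 : List String) (l1 l2 : List Int) :
    q1.zip (q2.zip (l1.zip l2)) =
      (List.range (min q1.length (min q2.length (min l1.length l2.length)))).map
        (fun j => (q1.getD j "", q2.getD j "", l1.getD j 0, l2.getD j 0)) := by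
  apply List.ext_getElem
  · simp
  · intro i h1 h2
    simp only [List.length_zip, lt_min_iff] at h1
    simp [List.getElem_zip, List.getD_eq_getElem?_getD,
      h1.1, h1.2.1, h1.2.2.1, h1.2.2.2]

-- ===== VERDICT (by name: the statement is the Claim_ definition above) =====
theorem build_new_tokens_spec : Claim_equal_build_new_tokens := by
  intro q1 q2 p1 p2 ac tl _
  unfold Spec_build_new_tokens build_new_tokens build_new_tokens_alt
  simp only [pvGoA_eq, pvIdxLoopB_eq, pvZip_eq_map_range,
    PySem.Int.floordiv_eq_ediv_of_pos (by omega : (0:Int) < 2)]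
  have hk : (-(-tl / 2) - (([] : List Nat).length : Int)).toNat = (max 0 ((tl - 0 + 1) / 2)).toNat := by
    simp only [List.length_nil]; omega
  simp only [Nat.sub_zero, List.nil_append, hk, ← List.range_eq_range']
  rw [Prod.ext_iff]
  constructor <;>
  · simp [List.filter_map, ← List.map_take, List.flatMap_map, Function.comp]
    rfl
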